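-- pv_equiv track=rewrite | github.com/AHHYEOON/coding_test-python | 프로그래머스/0/181935. 홀짝에 따라 다른 값 반환하기/홀짝에 따라 다른 값 반환하기.py | solution
-- ===== SOURCE A (Python) =====
-- def solution(n):
--     sum = 0
--     answer = 0
--     if n % 2 == 1:
--         for i in range(n+1):
--             if i % 2 == 1:
--                 answer += i
--     else :
--         for i in range(n+1):
--             if i % 2 == 0:
--                 r = i*i
--                 answer += r
--     return answer
-- ===== SOURCE B (Python) =====
-- def solution(n):
--     if n < 0:
--         return 0
--     if n % 2:
--         m = (n + 1) // 2
--         return m * m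
--     m = n // 2
--     return (2 * m * (m + 1) * (2 * m + 1)) // 3
-- ===== Notes on version B (the rewrite author's own statement) =====
-- stated objective: faster
-- what changed: Replaced A's linear loop over range(n+1) with closed-form arithmetic-series formulas for each parity branch.
import Mathlib
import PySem

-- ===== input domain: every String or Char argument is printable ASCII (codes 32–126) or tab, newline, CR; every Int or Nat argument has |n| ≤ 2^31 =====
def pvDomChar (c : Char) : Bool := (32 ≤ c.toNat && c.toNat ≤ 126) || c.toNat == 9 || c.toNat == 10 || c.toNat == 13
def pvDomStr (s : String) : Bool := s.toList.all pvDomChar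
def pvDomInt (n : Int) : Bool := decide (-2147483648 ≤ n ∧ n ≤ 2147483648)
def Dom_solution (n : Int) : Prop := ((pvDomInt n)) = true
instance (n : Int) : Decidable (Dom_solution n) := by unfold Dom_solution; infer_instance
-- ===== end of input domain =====

-- B replaces A's O(n) loop with closed-form arithmetic-series formulas (O(1)).

-- ===== PORT A =====
def solution (n : Int) : Int :=
  let answer : Int := 0
  if PySem.Int.mod n 2 = 1 then
    (PySem.List.pyRange 0 (n+1) 1).foldl
      (fun a i => if PySem.Int.mod i 2 = 1 then a + i else a) answer
  else
    (PySem.List.pyRange 0 (n+1) 1).foldl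
      (fun a i => if PySem.Int.mod i 2 = 0 then a + i*i else a) answer

-- ===== PORT B =====
def solution_alt (n : Int) : Int :=
  if n < 0 then 0
  else if ¬ (PySem.Int.mod n 2 = 0) then
    let m := PySem.Int.floordiv (n+1) 2
    m * m
  else
    let m := PySem.Int.floordiv n 2
    PySem.Int.floordiv (2*m*(m+1)*(2*m+1)) 3

-- ===== PRECONDITION & SPEC =====
def Spec_solution (n : Int) (out : Int) : Prop := out = solution_alt n
instance (n : Int) (out : Int) : Decidable (Spec_solution n out) := by unfold Spec_solution; infer_instance

-- ===== CLAIM (what is proved, stated in full; the proofs are below) =====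
def Claim_equal_solution : Prop := ∀ (n : Int), Dom_solution n → Spec_solution n (solution n)

-- ===== LEMMAS AND PROOFS =====

lemma oddsum (k : Nat) :
    (PySem.List.pyRange 0 (k:Int) 1).foldl
      (fun a i => if PySem.Int.mod i 2 = 1 then a + i else a) 0
    = ((k/2 : Nat) : Int) * ((k/2 : Nat) : Int) := by
  induction k with
  | zero => simp [PySem.List.pyRange_one_eq_nil]
  | succ k ih =>
    have h : ((k+1 : Nat) : Int) = (k : Int) + 1 := by push_cast; ring
    rw [h, PySem.List.pyRange_one_succ_right (by positivity), List.foldl_append, ih]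
    simp only [List.foldl]
    rw [PySem.Int.mod_eq_emod_of_pos (by norm_num)]
    rcases Nat.even_or_odd k with ⟨t, ht⟩ | ⟨t, ht⟩
    · subst ht
      have hne : ¬ (((t+t : Nat) : Int) % 2 = 1) := by push_cast; omega
      rw [if_neg hne, show (t+t+1)/2 = (t+t)/2 from by omega]
    · subst ht
      have h1 : ((2*t+1 : Nat) : Int) % 2 = 1 := by push_cast; omega
      rw [if_pos h1, show (2*t+1)/2 = t from by omega,
        show (2*t+1+1)/2 = t+1 from by omega]
      push_cast
      ring

lemma evensq (k : Nat) :
    3 * (PySem.List.pyRange 0 (k:Int) 1).foldl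
      (fun a i => if PySem.Int.mod i 2 = 0 then a + i*i else a) 0
    = 2 * (((k+1)/2 : Nat) : Int) * ((((k+1)/2 : Nat) : Int) - 1) * (2 * (((k+1)/2 : Nat) : Int) - 1) := by
  induction k with
  | zero => simp [PySem.List.pyRange_one_eq_nil]
  | succ k ih =>
    have h : ((k+1 : Nat) : Int) = (k : Int) + 1 := by push_cast; ring
    rw [h, PySem.List.pyRange_one_succ_right (by positivity), List.foldl_append]
    simp only [List.foldl]
    rw [PySem.Int.mod_eq_emod_of_pos (by norm_num)]
    rcases Nat.even_or_odd k with ⟨t, ht⟩ | ⟨t, ht⟩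
    · subst ht
      have h1 : ((t+t : Nat) : Int) % 2 = 0 := by push_cast; omega
      rw [if_pos h1, show (t+t+1+1)/2 = t+1 from by omega]
      rw [show (t+t+1)/2 = t from by omega] at ih
      push_cast at ih ⊢
      linear_combination ih
    · subst ht
      have hne : ¬ (((2*t+1 : Nat) : Int) % 2 = 0) := by push_cast; omega
      rw [if_neg hne, show (2*t+1+1+1)/2 = (2*t+1+1)/2 from by omega]
      exact ih

-- ===== VERDICT (by name: the statement is the Claim_ definition above) =====
theorem solution_spec : Claim_equal_solution := by
  intro n _
  unfold Spec_solution solution solution_alt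
  by_cases hneg : n < 0
  · rw [PySem.List.pyRange_one_eq_nil (by omega)]
    simp [hneg]
  · push_neg at hneg
    obtain ⟨k, rfl⟩ : ∃ k : Nat, n = (k : Int) := ⟨n.toNat, (Int.toNat_of_nonneg hneg).symm⟩
    rw [PySem.Int.mod_eq_emod_of_pos (a := (k:Int)) (by norm_num)]
    rw [if_neg (by omega : ¬ ((k:Int) < 0))]
    have hrange : (k : Int) + 1 = ((k+1 : Nat) : Int) := by push_cast; ring
    rcases Nat.even_or_odd k with ⟨t, ht⟩ | ⟨t, ht⟩
    · -- even n
      subst ht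
      have hm0 : ((t+t : Nat) : Int) % 2 = 0 := by push_cast; omega
      rw [if_neg (by omega : ¬ (((t+t : Nat) : Int) % 2 = 1)),
        if_neg (not_not_intro hm0), hrange]
      have hA := evensq (t+t+1)
      rw [show (t+t+1+1)/2 = t+1 from by omega] at hA
      have hfd : PySem.Int.floordiv ((t+t : Nat) : Int) 2 = (t : Int) := by
        rw [PySem.Int.floordiv_eq_ediv_of_pos (by norm_num)]
        push_cast; omega
      show _ = PySem.Int.floordiv
        (2 * PySem.Int.floordiv ((t+t : Nat) : Int) 2 * (PySem.Int.floordiv ((t+t : Nat) : Int) 2 + 1) *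
          (2 * PySem.Int.floordiv ((t+t : Nat) : Int) 2 + 1)) 3
      rw [hfd, eq_comm, PySem.Int.floordiv_eq_iff_of_pos (by norm_num)]
      constructor <;> push_cast at hA ⊢ <;> nlinarith [hA]
    · -- odd n
      subst ht
      have hm1 : ((2*t+1 : Nat) : Int) % 2 = 1 := by push_cast; omega
      rw [if_pos hm1, if_pos (by push_cast; omega : ¬ (((2*t+1 : Nat) : Int) % 2 = 0)), hrange]
      have hA := oddsum (2*t+1+1)
      rw [show (2*t+1+1)/2 = t+1 from by omega] at hA
      rw [hA]
      have hfd : PySem.Int.floordiv ((2*t+1+1 : Nat) : Int) 2 = (t : Int) + 1 := by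
        rw [PySem.Int.floordiv_eq_ediv_of_pos (by norm_num)]
        push_cast; omega
      show _ = PySem.Int.floordiv ((2*t+1+1 : Nat) : Int) 2 * PySem.Int.floordiv ((2*t+1+1 : Nat) : Int) 2
      rw [hfd]; push_cast; ring
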